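-- pv_equiv track=rewrite | github.com/bob-blob/sport-news-summarization | football/backend/summarization_system.py | make_sentence_vectors
-- ===== SOURCE A (Python) =====
-- def make_sentence_vectors(sentences, sentence_terms):
--     '''
--     Sentence vectors of length N where N is the number of different words in document and value at the index
--     is the number of times that word occurs in the sentence
--     :param sentences:
--     :param sentence_terms:
--     :return:
--     '''
--     sentence_vectors = []
--
--     for document in sentences:
--         sentence_vector = []
--         for term in sentence_terms:
--             freq = 0
--             for word in document:
--                 if word == term:
--                     freq = freq + 1
--             sentence_vector.append(freq)
--
--         sentence_vectors.append(sentence_vector)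
--
--     return sentence_vectors
-- ===== SOURCE B (Python) =====
-- def make_sentence_vectors(sentences, sentence_terms):
--     '''
--     Sentence vectors of length N where N is the number of different words in document and value at the index
--     is the number of times that word occurs in the sentence
--     :param sentences:
--     :param sentence_terms:
--     :return:
--     '''
--     # Inverted index: term -> all column positions it occupies (handles duplicate terms).
--     index = {}
--     for j, term in enumerate(sentence_terms):
--         index.setdefault(term, []).append(j)
--
--     vectors = []
--     for document in sentences:
--         vec = [0] * len(sentence_terms)
--         for word in document:
--             for j in index.get(word, ()):
--                 vec[j] += 1
--         vectors.append(vec)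
--     return vectors
-- ===== Notes on version B (the rewrite author's own statement) =====
-- stated objective: alternative
-- what changed: Replaces A's per-document term-by-term rescans with an inverted index (term -> its column positions, built once) and a word-driven pass that distributes +1 into a zero vector at each word's positions.
import Mathlib
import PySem

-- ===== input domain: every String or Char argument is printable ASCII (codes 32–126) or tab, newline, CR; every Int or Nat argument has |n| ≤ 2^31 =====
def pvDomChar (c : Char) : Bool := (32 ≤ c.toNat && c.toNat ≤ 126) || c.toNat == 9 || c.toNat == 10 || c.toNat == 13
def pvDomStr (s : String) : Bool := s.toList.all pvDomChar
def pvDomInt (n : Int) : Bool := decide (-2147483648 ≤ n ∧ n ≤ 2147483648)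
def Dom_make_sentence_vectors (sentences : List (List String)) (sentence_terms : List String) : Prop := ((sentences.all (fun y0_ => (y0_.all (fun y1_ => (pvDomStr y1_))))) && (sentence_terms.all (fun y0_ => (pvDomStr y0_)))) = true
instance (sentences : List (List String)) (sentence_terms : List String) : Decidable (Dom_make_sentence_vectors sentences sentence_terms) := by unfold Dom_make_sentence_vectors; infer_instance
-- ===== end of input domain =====

-- B inverts A's traversal: an inverted index term → column positions is built once, then each
-- document's vector starts as zeros and each word distributes +1 into its columns (an alternative,
-- word-driven traversal instead of A's term-by-term rescans of each document).

-- ===== PORT A =====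
def make_sentence_vectors (sentences : List (List String)) (sentence_terms : List String) : List (List Int) :=
  sentences.foldl (fun sentence_vectors document =>
    sentence_vectors ++ [sentence_terms.foldl (fun sentence_vector term =>
      sentence_vector ++ [document.foldl (fun freq word =>
        if word == term then freq + 1 else freq) (0 : Int)]) []]) []

-- ===== PORT B =====
-- vec[j] += 1  (j a valid position produced by enumerate)
def pvIncAt : List Int → Nat → List Int
  | [], _ => []
  | x :: xs, 0 => (x + 1) :: xs
  | x :: xs, k + 1 => x :: pvIncAt xs k

def make_sentence_vectors_alt (sentences : List (List String)) (sentence_terms : List String) : List (List Int) :=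
  -- index.setdefault(term, []).append(j) over enumerate(sentence_terms)
  let index : PySem.Dict String (List Nat) :=
    sentence_terms.zipIdx.foldl (fun d p => d.insert p.1 (d.getD p.1 [] ++ [p.2])) PySem.Dict.empty
  sentences.foldl (fun vectors document =>
    vectors ++ [document.foldl (fun vec word =>
      (index.getD word []).foldl (fun v j => pvIncAt v j) vec)
      (List.replicate sentence_terms.length (0 : Int))]) []

-- ===== PRECONDITION & SPEC =====
def Spec_make_sentence_vectors (sentences : List (List String)) (sentence_terms : List String) (out : List (List Int)) : Prop := out = make_sentence_vectors_alt sentences sentence_terms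
instance (sentences : List (List String)) (sentence_terms : List String) (out : List (List Int)) : Decidable (Spec_make_sentence_vectors sentences sentence_terms out) := by unfold Spec_make_sentence_vectors; infer_instance

-- ===== CLAIM (what is proved, stated in full; the proofs are below) =====
def Claim_equal_make_sentence_vectors : Prop := ∀ (sentences : List (List String)) (sentence_terms : List String), Dom_make_sentence_vectors sentences sentence_terms → Spec_make_sentence_vectors sentences sentence_terms (make_sentence_vectors sentences sentence_terms)

-- ===== LEMMAS AND PROOFS =====

-- A's inner word loop counts occurrences of term
lemma pv_inner_count (document : List String) (term : String) :
    document.foldl (fun freq word => if word == term then freq + 1 else freq) (0 : Int)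
      = (document.count term : Int) := by
  simpa [List.count] using PySem.List.foldl_count_if (fun word => word == term) document 0

-- pvIncAt keeps the length
lemma pv_incAt_length (v : List Int) (j : Nat) : (pvIncAt v j).length = v.length := by
  induction v generalizing j with
  | nil => simp [pvIncAt]
  | cons x xs ih =>
    cases j with
    | zero => simp [pvIncAt]
    | succ k => simp [pvIncAt, ih]

-- pvIncAt adds 1 at index j
lemma pv_incAt_getElem (v : List Int) (j k : Nat) (hk : k < v.length) :
    (pvIncAt v j)[k]'(by rw [pv_incAt_length]; exact hk)
      = v[k] + (if k = j then 1 else 0) := by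
  induction v generalizing j k with
  | nil => simp at hk
  | cons x xs ih =>
    cases j with
    | zero =>
      cases k with
      | zero => simp [pvIncAt]
      | succ m => simp [pvIncAt]
    | succ j' =>
      cases k with
      | zero => simp [pvIncAt]
      | succ m =>
        simp only [pvIncAt, List.getElem_cons_succ]
        rw [ih]
        · simp
        · simpa using hk

-- folding pvIncAt over a position list adds the multiplicity of each index
lemma pv_incFold_length (ps : List Nat) (v : List Int) :
    (ps.foldl (fun v j => pvIncAt v j) v).length = v.length := by
  induction ps generalizing v with
  | nil => rfl
  | cons p ps ih => simp [List.foldl_cons, ih, pv_incAt_length]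

lemma pv_incFold_getElem (ps : List Nat) (v : List Int) (k : Nat) (hk : k < v.length) :
    (ps.foldl (fun v j => pvIncAt v j) v)[k]'(by rw [pv_incFold_length]; exact hk)
      = v[k] + (ps.count k : Int) := by
  induction ps generalizing v with
  | nil => simp
  | cons p ps ih =>
    simp only [List.foldl_cons]
    rw [ih (pvIncAt v p) (by rw [pv_incAt_length]; exact hk)]
    rw [pv_incAt_getElem v p k hk, List.count_cons]
    by_cases h : k = p <;> simp [h] <;> omega

-- the built index looked up at w yields the positions of w among sentence_terms
lemma pv_index_getD (ps : List (String × Nat)) (d : PySem.Dict String (List Nat)) (w : String) :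
    (ps.foldl (fun d p => d.insert p.1 (d.getD p.1 [] ++ [p.2])) d).getD w []
      = d.getD w [] ++ ((ps.filter (fun p => p.1 == w)).map (·.2)) := by
  induction ps generalizing d with
  | nil => simp
  | cons p ps ih =>
    simp only [List.foldl_cons]
    rw [ih]
    by_cases h : p.1 = w
    · subst h
      simp [PySem.Dict.getD_insert_self]
    · rw [PySem.Dict.getD_insert]
      simp [h, Ne.symm h]

-- multiplicity of a column k among the positions of w = indicator [terms[k] = w]
lemma pv_pos_count (l : List String) (s k : Nat) (w : String) :
    (((l.zipIdx s).filter (fun p => p.1 == w)).map (·.2)).count (s + k)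
      = if l[k]? = some w then 1 else 0 := by
  induction l generalizing s k with
  | nil => simp
  | cons x xs ih =>
    cases k with
    | zero =>
      simp only [List.zipIdx_cons, List.filter_cons, List.getElem?_cons_zero, Nat.add_zero]
      have htail : (((xs.zipIdx (s + 1)).filter (fun p => p.1 == w)).map (·.2)).count s = 0 := by
        rw [List.count_eq_zero]
        intro hmem
        simp only [List.mem_map, List.mem_filter] at hmem
        obtain ⟨p, ⟨hp, _⟩, hps⟩ := hmem
        have := (List.mem_zipIdx hp).1
        omega
      by_cases h : x = w
      · simp [h, htail]
      · simp [h, htail, Ne.symm]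
    | succ m =>
      simp only [List.zipIdx_cons, List.filter_cons, List.getElem?_cons_succ]
      have hs : s + (m + 1) = (s + 1) + m := by omega
      rw [hs]
      by_cases h : x = w
      · subst h
        simp only [BEq.rfl, if_true, List.map_cons, List.count_cons]
        rw [ih]
        have hne : ¬ ((s : Nat) = s + 1 + m) := by omega
        simp [hne]
      · simp only [beq_iff_eq, h, if_false]
        exact ih (s + 1) m

-- B's word fold preserves the vector length
lemma pv_word_fold_length (idx : PySem.Dict String (List Nat)) (doc : List String) (v : List Int) :
    (doc.foldl (fun vec word => (idx.getD word []).foldl (fun v j => pvIncAt v j) vec) v).length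
      = v.length := by
  induction doc generalizing v with
  | nil => rfl
  | cons w ws ih => simp [List.foldl_cons, ih, pv_incFold_length]

-- elementwise: B's word fold adds, at column k, the total multiplicity of k over the words' position lists
lemma pv_word_fold_getElem (idx : PySem.Dict String (List Nat)) (doc : List String) (v : List Int)
    (k : Nat) (hk : k < v.length) :
    (doc.foldl (fun vec word => (idx.getD word []).foldl (fun v j => pvIncAt v j) vec) v)[k]'(by
        rw [pv_word_fold_length]; exact hk)
      = v[k] + (doc.map (fun word => ((idx.getD word []).count k : Int))).sum := by
  induction doc generalizing v with
  | nil => simp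
  | cons w ws ih =>
    simp only [List.foldl_cons, List.map_cons, List.sum_cons]
    rw [ih _ (by rw [pv_incFold_length]; exact hk),
        pv_incFold_getElem _ v k hk]
    ring

-- ===== VERDICT (by name: the statement is the Claim_ definition above) =====
theorem make_sentence_vectors_spec : Claim_equal_make_sentence_vectors := by
  intro sentences sentence_terms _
  unfold Spec_make_sentence_vectors make_sentence_vectors make_sentence_vectors_alt
  simp only [PySem.List.foldl_append_singleton_eq_map, List.nil_append]
  apply List.map_congr_left
  intro document _
  -- characterise the built index
  have hidx : ∀ w : String,
      (sentence_terms.zipIdx.foldl (fun d p => d.insert p.1 (d.getD p.1 [] ++ [p.2]))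
        PySem.Dict.empty).getD w []
      = ((sentence_terms.zipIdx.filter (fun p => p.1 == w)).map (·.2)) := by
    intro w
    rw [pv_index_getD]
    simp [PySem.Dict.getD_empty]
  apply List.ext_getElem
  · rw [List.length_map, pv_word_fold_length, List.length_replicate]
  intro k hk₁ hk₂
  have hkn : k < sentence_terms.length := by simpa using hk₁
  rw [List.getElem_map, pv_inner_count,
      pv_word_fold_getElem _ document _ k (by simpa using hkn)]
  have hcnt : ∀ w : String,
      ((((sentence_terms.zipIdx.foldl (fun d p => d.insert p.1 (d.getD p.1 [] ++ [p.2]))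
        PySem.Dict.empty).getD w []).count k : Int))
      = if sentence_terms[k]? = some w then (1 : Int) else 0 := by
    intro w
    rw [hidx w]
    have := pv_pos_count sentence_terms 0 k w
    simp only [Nat.zero_add] at this
    rw [this]
    by_cases h : sentence_terms[k]? = some w <;> simp [h]
  simp only [hcnt]
  have hget : sentence_terms[k]? = some sentence_terms[k] := List.getElem?_eq_getElem hkn
  have hfun : (fun word => if sentence_terms[k]? = some word then (1 : Int) else 0)
      = (fun word => if (word == sentence_terms[k]) = true then (1 : Int) else 0) := by
    funext w
    rw [hget]
    simp only [Option.some.injEq, beq_iff_eq]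
    by_cases h : w = sentence_terms[k]
    · simp [h]
    · have h2 : ¬ sentence_terms[k] = w := fun he => h he.symm
      simp [h, h2]
  rw [hfun, PySem.List.sum_map_ite_one_zero, List.getElem_replicate]
  rw [show document.countP (fun word => word == sentence_terms[k])
        = document.count sentence_terms[k] from rfl]
  ring
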